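-- pv_equiv track=rewrite | github.com/Florian-Riesen-CH/Advent-of-code-2023 | Day 14/main.py | east_gravity
-- ===== SOURCE A (Python) =====
-- def fall_rocks(line):
--     falling_line = list()
--     part_line = ''.join(line).split('#')
--     for part in part_line:
--         list_part = [i for i in part]
--         for i in range(len(list_part)):
--             if list_part[i] == 'O':
--                 for index in range(i,0,-1):
--                     if list_part[index-1] == 'O':
--                         break
--                     list_part[index-1] = 'O'
--                     list_part[index] = '.'
--         falling_line.extend(list_part)
--         falling_line.append('#')
--     del falling_line[-1]
--     return falling_line
--
-- def east_gravity(array):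
--     columns_reverse = [sous_liste[::-1] for sous_liste in array]
--     columns_final = list()
--     # Affichez le contenu de chaque colonne
--     for col_idx, column in enumerate(columns_reverse):
--         falling_line = fall_rocks(columns_reverse[col_idx])
--         columns_final.append(falling_line)
--     columns_reverse_reverse = [sous_liste[::-1] for sous_liste in columns_final]
--     lines = columns_reverse_reverse
--     return lines
-- ===== SOURCE B (Python) =====
-- def _pack(seg):
--     k = seg.count('O')
--     if k == 0:
--         return seg
--     p = seg.rfind('O')
--     return 'O' * k + '.' * (p + 1 - k) + seg[p + 1:]
--
-- def east_gravity(array):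
--     out = []
--     for row in array:
--         s = ''.join(reversed(row))
--         packed = '#'.join(_pack(seg) for seg in s.split('#'))
--         out.append(list(packed)[::-1])
--     return out
-- ===== Notes on version B (the rewrite author's own statement) =====
-- stated objective: faster
-- what changed: Per '#'-segment, B emits the packed result directly from one count and one rfind ('O'*k + '.'*(p+1-k) + tail) instead of A's per-rock inner bubble loop that drags each 'O' leftwards cell by cell.
import Mathlib
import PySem

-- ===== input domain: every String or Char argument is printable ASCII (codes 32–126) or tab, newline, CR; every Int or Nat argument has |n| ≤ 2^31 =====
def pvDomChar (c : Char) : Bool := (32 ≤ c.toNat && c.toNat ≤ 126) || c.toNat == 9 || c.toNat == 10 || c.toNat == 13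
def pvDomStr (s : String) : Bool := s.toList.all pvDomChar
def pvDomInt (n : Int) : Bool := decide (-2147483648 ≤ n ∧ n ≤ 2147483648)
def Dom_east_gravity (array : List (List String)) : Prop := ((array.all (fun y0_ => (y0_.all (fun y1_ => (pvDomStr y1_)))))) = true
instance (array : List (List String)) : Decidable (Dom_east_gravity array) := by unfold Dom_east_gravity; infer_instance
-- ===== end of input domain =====

-- B rewrites each '#'-separated segment in closed form (count + last-'O' position) instead of
-- A's per-rock inner bubble loop; the return values are proved equal on all inputs.

-- ===== PORT A =====
-- inner loop 'for index in range(i,0,-1): …' of fall_rocks; index counts down, break on 'O'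
def rollLoop (lst : List Char) : Nat → List Char
  | 0 => lst
  | j + 1 =>
    if lst[j]? = some 'O' then lst
    else rollLoop ((lst.set j 'O').set (j + 1) '.') j

-- the 'for i in range(len(list_part))' loop of fall_rocks over one '#'-free part
def fallPart (lst : List Char) : List Char :=
  (List.range lst.length).foldl
    (fun acc i => if acc[i]? = some 'O' then rollLoop acc i else acc) lst

-- fall_rocks: join, split on '#', roll each part, re-join with '#', drop the trailing '#'
-- (list elements are the 1-char strings Python gets iterating a str; represented as List Char)
def fall_rocks (line : List String) : List Char :=
  let part_line := PySem.Chars.splitOn (String.join line).toList ['#']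
  let falling_line := part_line.foldl (fun acc part => acc ++ fallPart part ++ ['#']) []
  falling_line.dropLast   -- del falling_line[-1]; falling_line is never empty

def east_gravity (array : List (List String)) : List (List String) :=
  let columns_reverse := array.map (fun sous_liste => sous_liste.reverse)   -- [::-1]
  let columns_final := columns_reverse.foldl (fun acc column => acc ++ [fall_rocks column]) []
  columns_final.map (fun sous_liste => (sous_liste.reverse).map (fun c => String.ofList [c]))

-- ===== PORT B =====
-- seg.rfind('O') (only used when 'O' occurs, so the found index as an Option)
def lastOIdx : List Char → Option Nat
  | [] => none
  | c :: cs =>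
    match lastOIdx cs with
    | some p => some (p + 1)
    | none => if c = 'O' then some 0 else none

-- B's _pack: 'O'*k + '.'*(p+1-k) + seg[p+1:]
def packSeg (seg : List Char) : List Char :=
  let k := seg.count 'O'
  if k = 0 then seg
  else
    match lastOIdx seg with
    | some p => List.replicate k 'O' ++ List.replicate (p + 1 - k) '.' ++ seg.drop (p + 1)
    | none => seg   -- unreachable: k ≠ 0

def east_gravity_alt (array : List (List String)) : List (List String) :=
  array.map (fun row =>
    let s := (String.join row.reverse).toList
    let packed := List.intercalate ['#'] ((PySem.Chars.splitOn s ['#']).map packSeg)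
    (packed.reverse).map (fun c => String.ofList [c]))

-- ===== PRECONDITION & SPEC =====
def Spec_east_gravity (array : List (List String)) (out : List (List String)) : Prop := out = east_gravity_alt array
instance (array : List (List String)) (out : List (List String)) : Decidable (Spec_east_gravity array out) := by unfold Spec_east_gravity; infer_instance

-- ===== CLAIM (what is proved, stated in full; the proofs are below) =====
def Claim_equal_east_gravity : Prop := ∀ (array : List (List String)), Dom_east_gravity array → Spec_east_gravity array (east_gravity array)

-- ===== LEMMAS AND PROOFS =====

-- closed form of A's segment result, phrased with B's helpers
def pack (l : List Char) : List Char :=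
  match lastOIdx l with
  | none => l
  | some p => List.replicate (l.count 'O') 'O' ++ List.replicate (p + 1 - l.count 'O') '.' ++ l.drop (p + 1)

theorem lastOIdx_none_iff (l : List Char) : lastOIdx l = none ↔ 'O' ∉ l := by
  induction l with
  | nil => simp [lastOIdx]
  | cons c cs ih =>
    simp only [lastOIdx]
    cases h : lastOIdx cs with
    | some p =>
      have hm : 'O' ∈ cs := by
        by_contra hmem
        rw [ih.mpr hmem] at h
        simp at h
      simp [hm]
    | none =>
      by_cases hc : c = 'O'
      · simp [hc]
      · simp [hc, ih.mp h, Ne.symm hc]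

theorem lastOIdx_spec (l : List Char) (p : Nat) (h : lastOIdx l = some p) :
    p < l.length ∧ l[p]? = some 'O' ∧ ∀ j, p < j → l[j]? ≠ some 'O' := by
  induction l generalizing p with
  | nil => simp [lastOIdx] at h
  | cons c cs ih =>
    simp only [lastOIdx] at h
    cases hcs : lastOIdx cs with
    | some q =>
      rw [hcs] at h
      obtain rfl : p = q + 1 := by simpa using h.symm
      obtain ⟨h1, h2, h3⟩ := ih q hcs
      refine ⟨by simpa using h1, by simpa using h2, ?_⟩
      intro j hj
      cases j with
      | zero => omega
      | succ j' => simpa using h3 j' (by omega)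
    | none =>
      rw [hcs] at h
      by_cases hc : c = 'O'
      · simp [hc] at h
        obtain rfl : p = 0 := h.symm
        have hno : 'O' ∉ cs := (lastOIdx_none_iff cs).mp hcs
        refine ⟨by simp, by simp [hc], ?_⟩
        intro j hj
        cases j with
        | zero => omega
        | succ j' =>
          simp only [List.getElem?_cons_succ]
          intro hmem
          exact hno (List.mem_of_getElem? hmem)
      · simp [hc] at h

theorem lastOIdx_append_singleton (l : List Char) (c : Char) :
    lastOIdx (l ++ [c]) = if c = 'O' then some l.length else lastOIdx l := by
  induction l with
  | nil => by_cases hc : c = 'O' <;> simp [lastOIdx, hc]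
  | cons d ds ih =>
    simp only [List.cons_append, lastOIdx, ih]
    by_cases hc : c = 'O' <;> simp [hc]

theorem count_le_lastOIdx (l : List Char) (p : Nat) (h : lastOIdx l = some p) :
    l.count 'O' ≤ p + 1 := by
  induction l generalizing p with
  | nil => simp [lastOIdx] at h
  | cons c cs ih =>
    simp only [lastOIdx] at h
    cases hcs : lastOIdx cs with
    | some q =>
      rw [hcs] at h
      obtain rfl : p = q + 1 := by simpa using h.symm
      have := ih q hcs
      by_cases hc : c = 'O' <;> simp [hc] <;> omega
    | none =>
      rw [hcs] at h
      by_cases hc : c = 'O'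
      · simp [hc] at h
        obtain rfl : p = 0 := h.symm
        have hno : 'O' ∉ cs := (lastOIdx_none_iff cs).mp hcs
        simp [hc, List.count_eq_zero.mpr hno]
      · simp [hc] at h

theorem notMem_drop_lastOIdx (l : List Char) (p : Nat) (h : lastOIdx l = some p) :
    'O' ∉ l.drop (p + 1) := by
  intro hmem
  obtain ⟨j, hj, hje⟩ := List.getElem_of_mem hmem
  have h3 := (lastOIdx_spec l p h).2.2 (p + 1 + j) (by omega)
  rw [← List.getElem?_drop] at h3
  exact h3 (by rw [List.getElem?_eq_getElem hj, hje])

theorem pack_length (l : List Char) : (pack l).length = l.length := by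
  unfold pack
  cases h : lastOIdx l with
  | none => rfl
  | some p =>
    have h1 := (lastOIdx_spec l p h).1
    have h2 := count_le_lastOIdx l p h
    simp [List.length_replicate, List.length_drop]
    omega

theorem rollLoop_eq (k : Nat) (mid rest : List Char) (hm : 'O' ∉ mid) :
    rollLoop (List.replicate k 'O' ++ mid ++ 'O' :: rest) (k + mid.length) =
      List.replicate (k + 1) 'O' ++ List.replicate mid.length '.' ++ rest := by
  induction mid using List.reverseRecOn generalizing rest with
  | nil =>
    simp only [List.length_nil, List.append_nil, Nat.add_zero]
    cases k with
    | zero => simp [rollLoop, List.replicate_succ]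
    | succ j =>
      have hget : (List.replicate (j + 1) 'O' ++ 'O' :: rest)[j]? = some 'O' := by
        rw [List.getElem?_append_left (by simp)]
        simp
      simp [rollLoop, hget, List.replicate_succ' (n := j + 1), List.append_assoc]
  | append_singleton l c ihl =>
    have hcO : c ≠ 'O' := fun hc => hm (by simp [hc])
    have hlO : 'O' ∉ l := fun hmem => hm (by simp [hmem])
    have hlen : (List.replicate k 'O' ++ l).length = k + l.length := by simp
    have hst : List.replicate k 'O' ++ (l ++ [c]) ++ 'O' :: rest
        = (List.replicate k 'O' ++ l) ++ c :: 'O' :: rest := by simp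
    simp only [List.length_append, List.length_singleton]
    have hidx : k + (l.length + 1) = (k + l.length) + 1 := by omega
    rw [hst, hidx]
    have hget : ((List.replicate k 'O' ++ l) ++ c :: 'O' :: rest)[k + l.length]? = some c := by
      rw [← hlen, List.getElem?_append_right (by omega)]
      simp
    simp only [rollLoop, hget]
    rw [if_neg (by simp [hcO])]
    have hset : (((List.replicate k 'O' ++ l) ++ c :: 'O' :: rest).set (k + l.length) 'O').set
        (k + l.length + 1) '.' = List.replicate k 'O' ++ l ++ 'O' :: '.' :: rest := by
      rw [← hlen]
      rw [List.set_append_right _ 'O' (Nat.le_refl _)]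
      simp only [Nat.sub_self, List.set_cons_zero]
      rw [List.set_append_right _ '.' (Nat.le_succ _)]
      have h1 : (List.replicate k 'O' ++ l).length + 1 - (List.replicate k 'O' ++ l).length = 1 := by
        omega
      rw [h1]
      simp only [List.set_cons_succ, List.set_cons_zero]
    rw [hset, ihl ('.' :: rest) hlO]
    simp [List.replicate_succ' (n := l.length), List.append_assoc]

theorem pack_snoc_O (l : List Char) :
    pack (l ++ ['O']) = List.replicate (l.count 'O' + 1) 'O' ++ List.replicate (l.length - l.count 'O') '.' := by
  have hcle : l.count 'O' ≤ l.length := List.count_le_length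
  have hdrop : (l ++ ['O']).drop (l.length + 1) = [] := by
    apply List.drop_eq_nil_of_le
    simp
  have hcount : (l ++ ['O']).count 'O' = l.count 'O' + 1 := by simp
  unfold pack
  rw [lastOIdx_append_singleton]
  simp only [if_true, hdrop, hcount, List.append_nil]
  congr 1
  congr 1
  omega

theorem pack_snoc_ne (l : List Char) (c : Char) (hc : c ≠ 'O') :
    pack (l ++ [c]) = pack l ++ [c] := by
  unfold pack
  rw [lastOIdx_append_singleton, if_neg hc]
  cases hl : lastOIdx l with
  | none => rfl
  | some p =>
    have hp := (lastOIdx_spec l p hl).1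
    have hcount : (l ++ [c]).count 'O' = l.count 'O' := by
      simp [hc]
    have hdrop : (l ++ [c]).drop (p + 1) = l.drop (p + 1) ++ [c] :=
      List.drop_append_of_le_length (by omega)
    simp [hcount, hdrop, List.append_assoc]

theorem foldl_step_eq (seg : List Char) (i : Nat) (hi : i ≤ seg.length) :
    (List.range i).foldl (fun acc j => if acc[j]? = some 'O' then rollLoop acc j else acc) seg
      = pack (seg.take i) ++ seg.drop i := by
  induction i with
  | zero => simp [pack, lastOIdx]
  | succ i ih =>
    have hi' : i ≤ seg.length := by omega
    have hilt : i < seg.length := by omega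
    have hlentake : (seg.take i).length = i := by simp [List.length_take]; omega
    rw [List.range_succ, List.foldl_append, ih hi']
    simp only [List.foldl_cons, List.foldl_nil]
    have hlenpack : (pack (seg.take i)).length = i := by rw [pack_length, hlentake]
    have hsti : (pack (seg.take i) ++ seg.drop i)[i]? = some seg[i] := by
      rw [List.getElem?_append_right (le_of_eq hlenpack), hlenpack, Nat.sub_self,
        List.getElem?_drop]
      simp [List.getElem?_eq_getElem hilt]
    by_cases hc : seg[i] = 'O'
    · rw [if_pos (by rw [hsti, hc])]
      have htake : seg.take (i + 1) = seg.take i ++ ['O'] := by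
        rw [List.take_add_one, List.getElem?_eq_getElem hilt, hc]
        rfl
      have hdropi : seg.drop i = 'O' :: seg.drop (i + 1) := by
        rw [List.drop_eq_getElem_cons hilt, hc]
      rw [htake, pack_snoc_O, hlentake]
      cases hl : lastOIdx (seg.take i) with
      | none =>
        have hno : 'O' ∉ seg.take i := (lastOIdx_none_iff _).mp hl
        have hcz : (seg.take i).count 'O' = 0 := List.count_eq_zero.mpr hno
        have hst : pack (seg.take i) ++ seg.drop i
            = List.replicate 0 'O' ++ seg.take i ++ 'O' :: seg.drop (i + 1) := by
          rw [hdropi]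
          simp [pack, hl]
        rw [hst]
        have hre := rollLoop_eq 0 (seg.take i) (seg.drop (i + 1)) hno
        rw [hlentake, Nat.zero_add] at hre
        rw [hre, hcz]
        simp
      | some p =>
        have hp := (lastOIdx_spec (seg.take i) p hl).1
        have hkle := count_le_lastOIdx (seg.take i) p hl
        have hnd := notMem_drop_lastOIdx (seg.take i) p hl
        rw [hlentake] at hp
        set k := (seg.take i).count 'O' with hk
        set mid := List.replicate (p + 1 - k) '.' ++ (seg.take i).drop (p + 1) with hmid
        have hnm : 'O' ∉ mid := by
          rw [hmid]
          intro hmem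
          rcases List.mem_append.mp hmem with h1 | h1
          · exact (by simpa using (List.eq_of_mem_replicate h1) : False)
          · exact hnd h1
        have hmlen : mid.length = i - k := by
          rw [hmid]
          simp [List.length_drop, hlentake]
          omega
        have hst : pack (seg.take i) ++ seg.drop i
            = List.replicate k 'O' ++ mid ++ 'O' :: seg.drop (i + 1) := by
          rw [hdropi]
          simp [pack, hl, hmid, ← hk, List.append_assoc]
        rw [hst]
        have hre := rollLoop_eq k mid (seg.drop (i + 1)) hnm
        rw [hmlen] at hre
        have hik : k + (i - k) = i := by omega
        rw [hik] at hre
        rw [hre]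
    · rw [if_neg (by rw [hsti]; simp [hc])]
      have htake : seg.take (i + 1) = seg.take i ++ [seg[i]] := by
        rw [List.take_add_one, List.getElem?_eq_getElem hilt]
        rfl
      have hdropi : seg.drop i = seg[i] :: seg.drop (i + 1) :=
        List.drop_eq_getElem_cons hilt
      rw [htake, pack_snoc_ne _ _ hc, hdropi]
      simp

theorem fallPart_eq_packSeg (seg : List Char) : fallPart seg = packSeg seg := by
  have h := foldl_step_eq seg seg.length (Nat.le_refl _)
  rw [List.take_length, List.drop_length, List.append_nil] at h
  rw [fallPart, h]
  unfold pack packSeg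
  cases hl : lastOIdx seg with
  | none =>
    rw [List.count_eq_zero.mpr ((lastOIdx_none_iff seg).mp hl)]
    simp
  | some p =>
    have hpos : seg.count 'O' ≠ 0 := by
      have := (lastOIdx_spec seg p hl).2.1
      have hm : 'O' ∈ seg := List.mem_of_getElem? this
      simpa [List.count_eq_zero] using (List.count_pos_iff.mpr hm).ne'
    rw [if_neg hpos]

theorem flatMap_hash_dropLast (f : List Char → List Char) (parts : List (List Char)) :
    (parts.flatMap (fun p => f p ++ ['#'])).dropLast = List.intercalate ['#'] (parts.map f) := by
  induction parts with
  | nil => simp [List.intercalate]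
  | cons p ps ih =>
    cases ps with
    | nil => simp [List.intercalate]
    | cons q qs =>
      rw [List.flatMap_cons]
      have hne : ((q :: qs).flatMap (fun p => f p ++ ['#'])) ≠ [] := by
        simp [List.flatMap_cons]
      rw [List.dropLast_append_of_ne_nil hne, ih]
      simp [List.intercalate, List.append_assoc]

theorem fall_rocks_eq (line : List String) :
    fall_rocks line =
      List.intercalate ['#']
        ((PySem.Chars.splitOn (String.join line).toList ['#']).map packSeg) := by
  unfold fall_rocks
  have hfold : ∀ parts : List (List Char),
      parts.foldl (fun acc part => acc ++ fallPart part ++ ['#']) []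
        = parts.flatMap (fun p => fallPart p ++ ['#']) := by
    intro parts
    rw [List.flatMap_eq_foldl]
    congr 1
    funext acc p
    rw [List.append_assoc]
  simp only [hfold, flatMap_hash_dropLast]
  rw [funext fallPart_eq_packSeg]

-- ===== VERDICT (by name: the statement is the Claim_ definition above) =====
theorem east_gravity_spec : Claim_equal_east_gravity := by
  intro array _
  show east_gravity array = east_gravity_alt array
  unfold east_gravity east_gravity_alt
  dsimp only
  rw [PySem.List.foldl_append_singleton_eq_map]
  simp [Function.comp, fall_rocks_eq]
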